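-- pv_equiv track=rewrite | github.com/hickatheworld/efreitris | game.py | actual_size
-- ===== SOURCE A (Python) =====
-- def actual_size(block: list[list[int]]) -> tuple[int, int]:
--     """
--     Returns the actual size of a given block rather than the size of the matrix it's stored in.
--     For example, a 2x1 block stored in a 3x3 matrix (e.g. Triangle's Horizontal Small I).
--
--     :param block: The block to get the size of.
--     :returns: The actual size of the specified block.
-- 	"""
--     width = 0
--     # Since a block starts from the bottom,
--     # we deduce the actual height from the first row in which there's a square (so technically, the value 1)
--     start = -1
--     for i in range(len(block)):
--         row = block[i]
--         # This represents the actual width in the current row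
--         w = 0
--         for j in range(len(row)):
--             val = row[j]
--             if val == 1:
--                 # If we find a 1 at index j, then the currently presumed width is j + 1, since array indexes start at 0.
--                  w = j + 1
--                  if start == -1:
--                       # If this is the first 1 we find, the current row is the top row of the actual block.
--                       start = i
--             # If the actual width of the current row is the biggest we have found so far,
--             # it becomes the presumed width of the block
--             if w > width:
--                  width = w
--     height = len(block) - start
--     return (width, height)
-- ===== SOURCE B (Python) =====
-- def actual_size(block: list[list[int]]) -> tuple[int, int]:
--     # Topmost row containing a square, found with a find-style search
--     # (-1 when there is none); the block occupies everything from that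
--     # row down to the bottom of the matrix.
--     start = next((i for i, row in enumerate(block) if 1 in row), -1)
--     # Width: walk the columns right to left and stop at the first column
--     # that holds a square.
--     width = 0
--     for j in range(max((len(row) for row in block), default=0) - 1, -1, -1):
--         if any(j < len(row) and row[j] == 1 for row in block):
--             width = j + 1
--             break
--     return (width, len(block) - start)
-- ===== Notes on version B (the rewrite author's own statement) =====
-- stated objective: alternative
-- what changed: Replaces A's single row-major scan with three interleaved accumulators (w, width, start) by two independent early-exit searches: a find-style search for the topmost row containing a 1, and a column-major right-to-left scan that stops at the first column containing a 1.
import Mathlib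
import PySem

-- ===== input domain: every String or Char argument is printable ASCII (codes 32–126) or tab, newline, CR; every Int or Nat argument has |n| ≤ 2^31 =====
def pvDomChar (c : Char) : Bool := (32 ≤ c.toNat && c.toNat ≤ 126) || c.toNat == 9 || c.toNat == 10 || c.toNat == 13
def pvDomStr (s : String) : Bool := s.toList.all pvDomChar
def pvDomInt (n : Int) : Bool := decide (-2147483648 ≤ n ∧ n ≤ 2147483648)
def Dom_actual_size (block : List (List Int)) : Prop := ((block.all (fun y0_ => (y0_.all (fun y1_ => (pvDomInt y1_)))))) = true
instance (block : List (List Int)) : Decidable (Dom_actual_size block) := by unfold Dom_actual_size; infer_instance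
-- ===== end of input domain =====

-- B replaces A's single row-major scan with interleaved accumulators by two independent
-- early-exit searches (topmost occupied row; column-major right-to-left width scan). Objective: alternative.

-- ===== PORT A =====
-- A-side helper: the body of A's inner loop (update w/start on a 1, then update width).
def stepA (i : Int) (a : Int × Int × Int) (q : Int × Int) : Int × Int × Int :=
  let a' := if q.2 = 1 then (q.1 + 1, a.2.1, if a.2.2 = -1 then i else a.2.2) else a
  if a'.1 > a'.2.1 then (a'.1, a'.1, a'.2.2) else a'

-- A-side helper: one iteration of A's outer loop over (i, row).
def rowA (acc : Int × Int) (p : Int × List Int) : Int × Int :=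
  let st2 := (PySem.List.enumerate p.2 0).foldl (stepA p.1) (0, acc.1, acc.2)
  (st2.2.1, st2.2.2)

def actual_size (block : List (List Int)) : Int × Int :=
  let st := (PySem.List.enumerate block 0).foldl rowA (0, -1)
  (st.1, (block.length : Int) - st.2)

-- ===== PORT B =====
-- B-side helper: next((i for i, row in enumerate(block) if 1 in row), -1).
def topRow : List (List Int) → Int → Int
  | [], _ => -1
  | r :: rs, s => if 1 ∈ r then s else topRow rs (s + 1)

-- B-side helper: 'any(j < len(row) and row[j] == 1 for row in block)'.
def colHas (block : List (List Int)) (j : Int) : Bool :=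
  block.any (fun row => decide (j < (row.length : Int)) && (PySem.List.pyGet? row j == some 1))

-- B-side helper: the for-loop over the descending range with its break.
def widthScan (block : List (List Int)) : List Int → Int
  | [] => 0
  | j :: js => if colHas block j then j + 1 else widthScan block js

def actual_size_alt (block : List (List Int)) : Int × Int :=
  let start := topRow block 0
  let len_max := PySem.List.maxD (block.map (fun r => (r.length : Int))) id 0
  let width := widthScan block (PySem.List.pyRange (len_max - 1) (-1) (-1))
  (width, (block.length : Int) - start)

-- ===== PRECONDITION & SPEC =====
def Spec_actual_size (block : List (List Int)) (out : Int × Int) : Prop := out = actual_size_alt block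
instance (block : List (List Int)) (out : Int × Int) : Decidable (Spec_actual_size block out) := by unfold Spec_actual_size; infer_instance

-- ===== CLAIM (what is proved, stated in full; the proofs are below) =====
def Claim_equal_actual_size : Prop := ∀ (block : List (List Int)), Dom_actual_size block → Spec_actual_size block (actual_size block)

-- ===== LEMMAS AND PROOFS =====

-- value of A's running w after scanning a row (the last 1's index + 1, or the initial w)
def lastW (row : List Int) (s w : Int) : Int :=
  (PySem.List.enumerate row s).foldl (fun a q => if q.2 = 1 then q.1 + 1 else a) w

-- offset-free form of lastW row 0 0: last index of a 1 in the row, plus one (0 if none)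
def lwr : List Int → Int
  | [] => 0
  | x :: r => if 0 < lwr r then lwr r + 1 else if x = 1 then 1 else 0

-- maximal width accumulator of A's outer loop
def MW (block : List (List Int)) (a : Int) : Int :=
  block.foldl (fun a row => max a (lastW row 0 0)) a

theorem one_mem_tail {x : Int} {r : List Int} (h : 1 ∈ x :: r) (hx : ¬ x = 1) : 1 ∈ r := by
  rcases List.mem_cons.mp h with h0 | h0
  · exact absurd h0.symm hx
  · exact h0

theorem one_mem_cons_iff {x : Int} (r : List Int) (hx : ¬ x = 1) : (1 ∈ x :: r) ↔ (1 ∈ r) :=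
  ⟨fun h => one_mem_tail h hx, fun h => List.mem_cons_of_mem _ h⟩

theorem lastW_nil (s w : Int) : lastW [] s w = w := rfl

theorem lastW_cons (x : Int) (r : List Int) (s w : Int) :
    lastW (x :: r) s w = lastW r (s + 1) (if x = 1 then s + 1 else w) := by
  simp [lastW, PySem.List.enumerate_cons]

theorem lastW_ge (row : List Int) : ∀ s w : Int, w ≤ s + 1 → w ≤ lastW row s w := by
  induction row with
  | nil => intro s w h; simp [lastW_nil]
  | cons x r ih =>
    intro s w h
    rw [lastW_cons]
    by_cases hx : x = 1
    · simp [hx]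
      have := ih (s + 1) (s + 1) (by omega)
      omega
    · simp [hx]
      exact ih (s + 1) w (by omega)

theorem innerA_eq (i : Int) (row : List Int) :
    ∀ s w width start : Int, w ≤ width → w ≤ s + 1 → (start = -1 ∨ 0 ≤ start) → 0 ≤ i →
    (PySem.List.enumerate row s).foldl (stepA i) (w, width, start)
      = (lastW row s w, max width (lastW row s w),
         if start = -1 ∧ 1 ∈ row then i else start) := by
  induction row with
  | nil =>
    intro s w width start h1 h2 h3 h4
    simp [lastW_nil]
    omega
  | cons x r ih =>
    intro s w width start h1 h2 h3 h4
    rw [PySem.List.enumerate_cons, List.foldl_cons, lastW_cons]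
    by_cases hx : x = 1
    · have hstep : stepA i (w, width, start) (s, x)
          = (s + 1, max width (s + 1), if start = -1 then i else start) := by
        simp only [stepA, hx]
        by_cases hgt : s + 1 > width <;> simp [hgt] <;> omega
      rw [hstep]
      have hstart' : (if start = -1 then i else start) = -1 ∨ 0 ≤ (if start = -1 then i else start) := by
        by_cases hs : start = -1 <;> simp [hs] <;> omega
      rw [ih (s + 1) (s + 1) (max width (s + 1)) _ (le_max_right _ _) (by omega) hstart' h4]
      have hlb := lastW_ge r (s + 1) (s + 1) (by omega)
      have hne : ¬ ((if start = -1 then i else start) = -1) := by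
        by_cases hs : start = -1 <;> simp [hs] <;> omega
      have hm : (1 : Int) ∈ x :: r := by simp [hx]
      rw [if_pos hx]
      have e2 : max (max width (s + 1)) (lastW r (s + 1) (s + 1))
          = max width (lastW r (s + 1) (s + 1)) := by omega
      rw [e2]
      have e3 : (if (if start = -1 then i else start) = -1 ∧ 1 ∈ r then i
            else (if start = -1 then i else start))
          = (if start = -1 ∧ 1 ∈ x :: r then i else start) := by
        simp only [hne, false_and, if_false]
        simp only [hm, and_true]
      rw [e3]
    · have hstep : stepA i (w, width, start) (s, x) = (w, width, start) := by
        simp only [stepA]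
        rw [if_neg hx]
        have hle : ¬ ((w, width, start).1 > (w, width, start).2.1) := by simp; omega
        rw [if_neg hle]
      rw [hstep, ih (s + 1) w width start h1 (by omega) h3 h4, if_neg hx]
      simp only [one_mem_cons_iff r hx]

theorem MW_nil (a : Int) : MW [] a = a := rfl

theorem MW_cons (r : List Int) (rs : List (List Int)) (a : Int) :
    MW (r :: rs) a = MW rs (max a (lastW r 0 0)) := rfl

theorem outerA_eq (block : List (List Int)) :
    ∀ s width start : Int, 0 ≤ width → (start = -1 ∨ 0 ≤ start) → 0 ≤ s →
    (PySem.List.enumerate block s).foldl rowA (width, start)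
      = (MW block width, if start = -1 then topRow block s else start) := by
  induction block with
  | nil =>
    intro s width start h1 h2 h3
    simp only [PySem.List.enumerate_nil, List.foldl_nil, MW_nil, topRow]
    rcases h2 with hs | hs
    · simp [hs]
    · have hne : ¬ (start = -1) := by omega
      simp [hne]
  | cons r rs ih =>
    intro s width start h1 h2 h3
    rw [PySem.List.enumerate_cons, List.foldl_cons]
    have hrow : rowA (width, start) (s, r)
        = (max width (lastW r 0 0), if start = -1 ∧ 1 ∈ r then s else start) := by
      simp only [rowA]
      rw [innerA_eq s r 0 0 width start h1 (by omega) h2 h3]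
    rw [hrow]
    have hstart' : (if start = -1 ∧ 1 ∈ r then s else start) = -1
        ∨ 0 ≤ (if start = -1 ∧ 1 ∈ r then s else start) := by
      by_cases hc : start = -1 ∧ 1 ∈ r <;> simp [hc] <;> omega
    rw [ih (s + 1) _ _ (le_trans h1 (le_max_left _ _)) hstart' (by omega)]
    rw [MW_cons]
    rcases h2 with hs | hs
    · by_cases hr : 1 ∈ r
      · have hsp : (if start = -1 ∧ 1 ∈ r then s else start) = s := by simp [hs, hr]
        rw [hsp]
        have hsne : ¬ ((s : Int) = -1) := by omega
        simp [hsne, topRow, hr, hs]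
      · simp [hs, hr, topRow]
    · have hne : ¬ (start = -1) := by omega
      simp [hne]

theorem A_closed (block : List (List Int)) :
    actual_size block = (MW block 0, (block.length : Int) - topRow block 0) := by
  simp only [actual_size]
  rw [outerA_eq block 0 0 (-1) le_rfl (Or.inl rfl) le_rfl]
  simp

-- lwr basics
theorem lwr_nonneg (row : List Int) : 0 ≤ lwr row := by
  induction row with
  | nil => simp [lwr]
  | cons x r ih =>
    simp only [lwr]
    by_cases h : 0 < lwr r
    · simp [h]; omega
    · by_cases hx : x = 1 <;> simp [h, hx]

theorem lwr_le_len (row : List Int) : lwr row ≤ (row.length : Int) := by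
  induction row with
  | nil => simp [lwr]
  | cons x r ih =>
    simp only [lwr, List.length_cons]
    by_cases h : 0 < lwr r
    · simp [h]; push_cast; omega
    · by_cases hx : x = 1 <;> simp [h, hx] <;> push_cast <;> omega

theorem lastW_eq_lwr (row : List Int) :
    ∀ s w : Int, lastW row s w = if lwr row = 0 then w else s + lwr row := by
  induction row with
  | nil => intro s w; simp [lastW_nil, lwr]
  | cons x r ih =>
    intro s w
    rw [lastW_cons, ih (s + 1)]
    have hnn := lwr_nonneg r
    by_cases h : 0 < lwr r
    · have h0 : ¬ (lwr r = 0) := by omega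
      have h1 : lwr (x :: r) = lwr r + 1 := by simp [lwr, h]
      have h2 : ¬ (lwr (x :: r) = 0) := by omega
      rw [if_neg h0, h1]
      rw [if_neg (by omega : ¬ (lwr r + 1 = 0))]
      ring
    · have h0 : lwr r = 0 := by omega
      by_cases hx : x = 1
      · subst hx
        have h1 : lwr ((1:Int) :: r) = 1 := by simp [lwr, h]
        simp [h0, h1]
      · have h1 : lwr (x :: r) = 0 := by simp [lwr, h, hx]
        simp [h0, h1, hx]

theorem lastW00_eq_lwr (row : List Int) : lastW row 0 0 = lwr row := by
  rw [lastW_eq_lwr]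
  by_cases h : lwr row = 0 <;> simp [h]

-- the cell lwr points at is a 1
theorem lwr_get (row : List Int) :
    0 < lwr row → row[((lwr row).toNat - 1)]? = some 1 := by
  induction row with
  | nil => simp [lwr]
  | cons x r ih =>
    intro h
    by_cases hr : 0 < lwr r
    · have h1 : lwr (x :: r) = lwr r + 1 := by simp [lwr, hr]
      have h2 : (lwr (x :: r)).toNat - 1 = ((lwr r).toNat - 1) + 1 := by omega
      rw [h2, List.getElem?_cons_succ]
      exact ih hr
    · have h0 : lwr r = 0 := by have := lwr_nonneg r; omega
      by_cases hx : x = 1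
      · subst hx
        have h1 : lwr ((1:Int) :: r) = 1 := by simp [lwr, hr]
        rw [h1]
        simp
      · have h1 : lwr (x :: r) = 0 := by simp [lwr, hr, hx]
        rw [h1] at h; omega

-- any 1-cell lies strictly left of lwr
theorem get_le_lwr (row : List Int) :
    ∀ k : Nat, row[k]? = some 1 → (k : Int) + 1 ≤ lwr row := by
  induction row with
  | nil => intro k h; simp at h
  | cons x r ih =>
    intro k h
    have hnn := lwr_nonneg r
    cases k with
    | zero =>
      simp at h
      have hx : x = 1 := h
      simp only [lwr]
      by_cases hr : 0 < lwr r <;> simp [hr, hx] <;> omega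
    | succ k' =>
      rw [List.getElem?_cons_succ] at h
      have := ih k' h
      have hr : 0 < lwr r := by omega
      have h1 : lwr (x :: r) = lwr r + 1 := by simp [lwr, hr]
      rw [h1]; push_cast; omega

-- MW via lwr
def MWl (block : List (List Int)) (a : Int) : Int :=
  block.foldl (fun a row => max a (lwr row)) a

theorem MW_eq_MWl (block : List (List Int)) : ∀ a : Int, MW block a = MWl block a := by
  induction block with
  | nil => intro a; rfl
  | cons r rs ih =>
    intro a
    rw [MW_cons, lastW00_eq_lwr]
    exact ih _

theorem le_MWl (block : List (List Int)) : ∀ a : Int, a ≤ MWl block a := by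
  induction block with
  | nil => intro a; simp [MWl]
  | cons r rs ih =>
    intro a
    have := ih (max a (lwr r))
    simp only [MWl, List.foldl_cons] at *
    omega

theorem lwr_le_MWl (block : List (List Int)) :
    ∀ a : Int, ∀ row ∈ block, lwr row ≤ MWl block a := by
  induction block with
  | nil => intro a row h; simp at h
  | cons r rs ih =>
    intro a row h
    rcases List.mem_cons.mp h with h0 | h0
    · subst h0
      have := le_MWl rs (max a (lwr row))
      simp only [MWl, List.foldl_cons] at *
      omega
    · exact ih _ row h0

theorem MWl_attained (block : List (List Int)) :
    ∀ a : Int, MWl block a = a ∨ ∃ row ∈ block, MWl block a = lwr row := by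
  induction block with
  | nil => intro a; left; rfl
  | cons r rs ih =>
    intro a
    have hstep : MWl (r :: rs) a = MWl rs (max a (lwr r)) := rfl
    rcases ih (max a (lwr r)) with h | ⟨row, hm, he⟩
    · by_cases hc : a ≤ lwr r
      · right
        exact ⟨r, by simp, by rw [hstep, h]; omega⟩
      · left
        rw [hstep, h]; omega
    · right
      exact ⟨row, List.mem_cons_of_mem _ hm, by rw [hstep, he]⟩

-- colHas characterisation against MWl
theorem colHas_false_of_ge (block : List (List Int)) (j : Int)
    (h0 : 0 ≤ j) (h : MWl block 0 ≤ j) : colHas block j = false := by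
  rw [colHas, List.any_eq_false]
  intro row hrow
  rw [Bool.not_eq_true, Bool.and_eq_false_iff]
  by_cases hl : j < (row.length : Int)
  · right
    rw [beq_eq_false_iff_ne]
    intro hv
    have hg : row[j.toNat]? = some 1 := by
      rw [PySem.List.pyGet?, PySem.List.pyIdx?, if_pos h0, if_pos (by push_cast; omega)] at hv
      simpa using hv
    have := get_le_lwr row j.toNat hg
    have := lwr_le_MWl block 0 row hrow
    omega
  · left; simpa using hl

theorem colHas_true_at (block : List (List Int))
    (h : 0 < MWl block 0) : colHas block (MWl block 0 - 1) = true := by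
  rcases MWl_attained block 0 with h0 | ⟨row, hm, he⟩
  · omega
  · rw [colHas, List.any_eq_true]
    refine ⟨row, hm, ?_⟩
    have hlen := lwr_le_len row
    have hnn := lwr_nonneg row
    have hg := lwr_get row (by omega : 0 < lwr row)
    rw [Bool.and_eq_true, beq_iff_eq]
    constructor
    · rw [decide_eq_true_iff]; omega
    · rw [PySem.List.pyGet?, PySem.List.pyIdx?, if_pos (by omega : (0:Int) ≤ MWl block 0 - 1),
          if_pos (by rw [he]; push_cast; omega)]
      have hk : (MWl block 0 - 1).toNat = (lwr row).toNat - 1 := by omega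
      simp only [hk, Option.bind]
      rw [he] at *
      simpa using hg

-- the descending column scan finds exactly MWl block 0
theorem pyRange_down_nil (t : Int) (h : t < 0) : PySem.List.pyRange t (-1) (-1) = [] := by
  unfold PySem.List.pyRange
  rw [if_neg (by norm_num : ¬((-1:Int) = 0)), if_neg (by norm_num : ¬((0:Int) < -1)),
      if_neg (by omega : ¬((-1:Int) < t))]
  simp

theorem pyRange_down_cons (t : Int) (h : 0 ≤ t) :
    PySem.List.pyRange t (-1) (-1) = t :: PySem.List.pyRange (t-1) (-1) (-1) := by
  unfold PySem.List.pyRange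
  rw [if_neg (by norm_num : ¬((-1:Int) = 0)), if_neg (by norm_num : ¬((-1:Int) = 0)),
      if_neg (by norm_num : ¬((0:Int) < -1)), if_neg (by norm_num : ¬((0:Int) < -1)),
      if_pos (by omega : (-1:Int) < t)]
  by_cases h2 : (-1:Int) < t - 1
  · rw [if_pos h2]
    have e1 : (t - -1 + - -1 - 1) / - -1 = t + 1 := by norm_num
    have e2 : (t - 1 - -1 + - -1 - 1) / - -1 = t := by
      have : t - 1 - -1 + - -1 - 1 = t := by ring
      rw [this]; norm_num
    simp only [e1, e2]
    have e3 : (t + 1).toNat = t.toNat + 1 := by omega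
    simp only [e3, List.range_succ_eq_map, List.map_cons, List.map_map]
    congr 1
    · norm_num
    · apply List.map_congr_left
      intro k _
      simp only [Function.comp]
      push_cast
      ring
  · have ht : t = 0 := by omega
    subst ht
    rw [if_neg h2]
    norm_num

theorem widthScan_range (block : List (List Int)) (W : Int)
    (hW0 : 0 ≤ W)
    (hfalse : ∀ j : Int, 0 ≤ j → W ≤ j → colHas block j = false)
    (htrue : 0 < W → colHas block (W - 1) = true) :
    ∀ n : Nat, ∀ t : Int, (t + 1).toNat = n → W - 1 ≤ t →
    widthScan block (PySem.List.pyRange t (-1) (-1)) = W := by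
  intro n
  induction n with
  | zero =>
    intro t hn ht
    have htneg : t < 0 := by omega
    rw [pyRange_down_nil t htneg]
    simp only [widthScan]
    omega
  | succ m ih =>
    intro t hn ht
    have htn : 0 ≤ t := by omega
    rw [pyRange_down_cons t htn]
    simp only [widthScan]
    by_cases hc : colHas block t = true
    · rw [if_pos hc]
      have hlt : t < W := by
        by_contra hge
        have := hfalse t htn (by omega)
        rw [hc] at this; exact absurd this (by simp)
      omega
    · rw [if_neg hc]
      apply ih (t - 1) (by omega)
      by_cases hW : 0 < W
      · have := htrue hW
        by_contra hgt
        have he : t = W - 1 := by omega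
        rw [he] at hc
        exact hc this
      · omega

-- max over row lengths: maxD with nonnegative values is a fold of max
theorem max?_cons_eq (x y : Int) (xs : List Int) :
    PySem.List.max? (x :: y :: xs) id = PySem.List.max? (max x y :: xs) id := by
  simp only [PySem.List.max?, List.foldl_cons]
  congr 1
  by_cases h : x < y
  · simp [h, max_eq_right (le_of_lt h)]
  · simp [h, max_eq_left (not_lt.mp h)]

theorem max?_fold (xs : List Int) :
    ∀ m : Int, PySem.List.max? (m :: xs) id = some (xs.foldl max m) := by
  induction xs with
  | nil => intro m; rfl
  | cons x r ih =>
    intro m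
    rw [max?_cons_eq m x r, ih (max m x), List.foldl_cons]

theorem maxD_nonneg_eq_fold (xs : List Int) (hnn : ∀ x ∈ xs, 0 ≤ x) :
    PySem.List.maxD xs id 0 = xs.foldl max 0 := by
  cases xs with
  | nil => rfl
  | cons x r =>
    have hx : 0 ≤ x := hnn x (by simp)
    have h0 : max (0:Int) x = x := by omega
    rw [show PySem.List.maxD (x :: r) id 0 = (PySem.List.max? (x :: r) id).getD 0 from rfl,
        max?_fold r x, Option.getD_some, List.foldl_cons, h0]

theorem le_foldl_max_int (xs : List Int) : ∀ m : Int, m ≤ xs.foldl max m := by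
  induction xs with
  | nil => intro m; simp
  | cons x r ih =>
    intro m
    have := ih (max m x)
    simp only [List.foldl_cons]
    omega

theorem mem_le_foldl_max_int (xs : List Int) :
    ∀ m : Int, ∀ x ∈ xs, x ≤ xs.foldl max m := by
  induction xs with
  | nil => intro m x h; simp at h
  | cons y r ih =>
    intro m x h
    rcases List.mem_cons.mp h with h0 | h0
    · subst h0
      have := le_foldl_max_int r (max m x)
      simp only [List.foldl_cons]
      omega
    · exact ih _ x h0

theorem MWl_le_bound (block : List (List Int)) (c : Int)
    (hc : 0 ≤ c) (h : ∀ row ∈ block, lwr row ≤ c) : MWl block 0 ≤ c := by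
  rcases MWl_attained block 0 with h0 | ⟨row, hm, he⟩
  · omega
  · rw [he]; exact h row hm

-- ===== VERDICT (by name: the statement is the Claim_ definition above) =====
theorem actual_size_spec : Claim_equal_actual_size := by
  unfold Claim_equal_actual_size Spec_actual_size
  intro block _
  rw [A_closed]
  simp only [actual_size_alt]
  set L := PySem.List.maxD (block.map (fun r => (r.length : Int))) id 0 with hL
  have hLf : L = (block.map (fun r => (r.length : Int))).foldl max 0 := by
    rw [hL, maxD_nonneg_eq_fold]
    intro x hx
    rcases List.mem_map.mp hx with ⟨r, _, he⟩
    omega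
  have hW0 : 0 ≤ MWl block 0 := le_MWl block 0
  have hWL : MWl block 0 ≤ L := by
    apply MWl_le_bound
    · rw [hLf]; exact le_foldl_max_int _ 0
    · intro row hrow
      have h1 := lwr_le_len row
      have h2 : (row.length : Int) ≤ L := by
        rw [hLf]
        exact mem_le_foldl_max_int _ 0 _ (List.mem_map.mpr ⟨row, hrow, rfl⟩)
      omega
  have hscan : widthScan block (PySem.List.pyRange (L - 1) (-1) (-1)) = MWl block 0 := by
    apply widthScan_range block (MWl block 0) hW0
      (fun j hj0 hj => colHas_false_of_ge block j hj0 hj)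
      (colHas_true_at block)
      ((L - 1) + 1).toNat (L - 1) rfl (by omega)
  rw [hscan, MW_eq_MWl]
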